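/- GENERATED by mk_final_copies.py from the proof of the farm's unit `start_decoder.R12` (farm:start_decoder.R12.2: Proof.lean) as the
   re-elaboration sweep compiled it — do not edit. -/
/-
  start_decoder.R12 (0x116482 – 0x11655a): the submap loop 4132 (`for (j = 0; j < m->submaps; ++j)`), then `++i`.
  The walk is cut at the loop head and at the three returns of `get_bits` (work/Lemmas.lean: `seg_head`, `seg_floor_call`,
  `seg_floor_store`, `seg_residue`, each from one cut assertion `Pt` / `PtC` to the next); here: the entry assertion gives `Pt`
  with `j = 0`, one round of the loop is the composition of the four pieces, the loop is `ReachVia.loop` on the measure `16 − j`.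
-/
import Asan.CheckWalk
import Vorbis.Spec.Units.start_decoder_R12
import Vorbis.Spec.Worked.start_decoder_R12_Lemmas

open X86 X86.User Asan Vorbis Vorbis.Spec Vorbis.Spec.StartDecoder

set_option maxRecDepth 4000
set_option maxHeartbeats 4000000

namespace Vorbis.Spec.start_decoder_R12

/-- **The loop invariant at the entry of the segment** (0x116545 = cut310, `j = 0`): `Pt` from `BodyR12`. -/
theorem pt_of_body {u₀ : State} {g : Ghost} {i : Nat} {A7 A7c Ai : Arena} {A : Arena × List Obj} {v : State}
    (hb : BodyR12 u₀ g i A7 A7c Ai A v) :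
    Pt u₀ g i A7 A7c Ai A (mapAt g v.mem i) 0 Vorbis.L.start_decoder.cut310 v := by
  have fr := hb.loop.frame
  have hroom := fr.entry.room
  simp only [depth] at hroom
  have hRA : g.RA = (g.e.reg .rsp).toNat := rfl
  have hR : g.R = (g.e.reg .rsp).toNat - 1480 := rfl
  -- rsp: `addr g.R` in the walker's form `g.e.reg .rsp - 1480`
  have hrsp : v.reg .rsp = g.e.reg .rsp - 1480 := by
    have h1480 : 1480 ≤ (g.e.reg .rsp).toNat := by omega
    rw [fr.rsp, hR, ← addr_sub_lit (g.e.reg .rsp).toNat 1480 h1480, addr_toNat]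
  -- the mapping loop's counter slot `[R + 10H]`
  have hslot_addr : addr (g.R + 16) = g.e.reg .rsp - 1464 := by
    symm
    apply eq_addr
    u_omega
  have hcnt : v.mem.readLE (g.e.reg .rsp - 1464) 4 = i := by
    rw [← hslot_addr]
    exact hb.loop.cnt
  exact ⟨fr.entry, Geo.of_body hb, hb.loop.hand, fr.offText, fr.ext, fr.callers, fr.rip, hrsp, hb.loop.rbp, hb.rbx,
    hb.r13, by omega, R12Inv.of_body hb, hcnt, fr.inv⟩

end Vorbis.Spec.start_decoder_R12

/-- **Segment R12 of `start_decoder`**: from `AtR12` (the head of loop 4132 with `j = 0`) to `AtR8` with `i + 1` (the loop's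
exit, `++i`) or `AtERR` (one of the two `return error(f, VORBIS_invalid_setup)`). -/
theorem Vorbis.Spec.Worked.start_decoder_R12_ok : Vorbis.Spec.start_decoder_R12.Statement := by
  unfold Vorbis.Spec.start_decoder_R12.Statement
  intro Lay hLay μ hμ u₀ hcode h_get_bits h_store1 h_load1 h_load4 h_error g i v hat
  obtain ⟨A7, A7c, Ai, A, hb⟩ := hat
  have hp0 := Vorbis.Spec.start_decoder_R12.pt_of_body hb
  obtain ⟨m, hm⟩ : ∃ m, mapAt g v.mem i = m := ⟨_, rfl⟩
  rw [hm] at hp0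
  -- the loop: invariant `∃ j, Pt … j` at the head 0x116545, measure `16 − j` (r13 = j)
  refine ReachVia.loop (Inv := fun w => ∃ j, Vorbis.Spec.start_decoder_R12.Pt u₀ g i A7 A7c Ai A m j
      Vorbis.L.start_decoder.cut310 w)
    (fun w => 16 - (w.reg .r13).toNat) ?_ v ⟨0, hp0⟩
  intro w hw
  obtain ⟨j, hp⟩ := hw
  have hr13 : (w.reg .r13).toNat = j := by
    rw [hp.r13]
    exact toNat_addr j (by have := hp.j_le; omega)
  -- 0x116545 → 0x115f22 (exit) | 0x11648f
  refine (Vorbis.Spec.start_decoder_R12.seg_head hLay hμ hcode h_get_bits hp).trans ?_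
  intro w1 h1
  rcases h1 with hexit | ⟨hp1, hjlt⟩
  · exact ReachVia.done (Or.inl (Or.inl hexit))
  -- 0x11648f → 0x11649c
  refine (Vorbis.Spec.start_decoder_R12.seg_floor_call hLay hμ hcode h_get_bits hp1).trans ?_
  intro w2 hp2
  -- 0x11649c → 0x1164c7
  refine (Vorbis.Spec.start_decoder_R12.seg_floor_store hLay hμ hcode h_get_bits h_store1 hp2 hjlt).trans ?_
  intro w3 hp3
  -- 0x1164c7 → 0x116545 (the back edge, `j + 1`) | 0x113b22 (the two error exits)
  refine (Vorbis.Spec.start_decoder_R12.seg_residue hLay hμ hcode h_store1 h_load1 h_load4 h_error hp3).mono ?_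
  intro w4 h4
  rcases h4 with herr | hp4
  · exact Or.inl (Or.inr herr)
  · refine Or.inr ⟨⟨j + 1, hp4⟩, ?_⟩
    have hr13' : (w4.reg .r13).toNat = j + 1 := by
      rw [hp4.r13]
      exact toNat_addr (j + 1) (by omega)
    show 16 - (w4.reg .r13).toNat < 16 - (w.reg .r13).toNat
    rw [hr13, hr13']
    omega
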